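-- pv_equiv track=rewrite | github.com/tommmmudd/ness-tools | nesstools/markovGeneral.py | markovEventsFromStringData
-- ===== SOURCE A (Python) =====
-- def markovEventsFromStringData(strings):
--     stringCount = len(strings)
--     # format for events: [t, [f,f,f]]
--     eventArray = []
--     for s, string in enumerate(strings):
--         for item in string:
--             t = int(item[0])
--             fret = int(item[1])
--             exists = False
--             for e in eventArray:
--                 if t == e[0]:
--                     # event found, so add this event to it
--                     exists = True
--                     e[1][s] = fret   # set the relevant fret, based on which string we're looking at
--                     break
--             if not exists:
--                 newFrets = [-1 for i in range(stringCount)] # all null frets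
--                 newFrets[s] = fret                  # set the specific string fret
--                 eventArray.append([t, newFrets])
--     sortedEvents = sorted(eventArray, key=lambda x: x[0])
--     return sortedEvents
-- ===== SOURCE B (Python) =====
-- def markovEventsFromStringData(strings):
--     stringCount = len(strings)
--     # different algorithm: flatten to (t, s, fret) triples, sort ONCE (stable),
--     # then a single pass grouping consecutive equal-time runs into fret arrays
--     triples = [(int(item[0]), s, int(item[1]))
--                for s, string in enumerate(strings) for item in string]
--     triples.sort(key=lambda x: x[0])
--     events = []
--     i = 0
--     while i < len(triples):
--         t = triples[i][0]
--         frets = [-1] * stringCount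
--         while i < len(triples) and triples[i][0] == t:
--             frets[triples[i][1]] = triples[i][2]
--             i += 1
--         events.append([t, frets])
--     return events
-- ===== Notes on version B (the rewrite author's own statement) =====
-- stated objective: alternative
-- what changed: B flattens the input to (t, s, fret) triples, stable-sorts them once by t, and builds the events in a single pass grouping consecutive equal-time runs, instead of A's per-item linear rescan of the growing event array followed by a sort.
import Mathlib
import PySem

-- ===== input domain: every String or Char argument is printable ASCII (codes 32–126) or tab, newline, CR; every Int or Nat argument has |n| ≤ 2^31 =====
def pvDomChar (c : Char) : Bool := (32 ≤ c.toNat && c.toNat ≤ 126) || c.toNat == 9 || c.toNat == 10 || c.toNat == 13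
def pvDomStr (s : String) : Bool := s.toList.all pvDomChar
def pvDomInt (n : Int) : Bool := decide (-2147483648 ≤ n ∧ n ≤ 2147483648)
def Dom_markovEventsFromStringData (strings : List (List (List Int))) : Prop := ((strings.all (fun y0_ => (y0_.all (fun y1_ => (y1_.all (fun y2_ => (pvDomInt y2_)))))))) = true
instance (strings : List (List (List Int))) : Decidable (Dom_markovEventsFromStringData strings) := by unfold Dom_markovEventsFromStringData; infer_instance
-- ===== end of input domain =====

-- B flattens to (t,s,fret) triples, sorts once, and groups consecutive equal-time runs, replacing A's per-item rescan of the growing event array (alternative algorithm).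


-- ===== PORT A =====
-- A's inner scan over eventArray: on the first entry with the same time, set frets[s]; if none, append a fresh event.
def aUpdate (n : Nat) (s : Int) (t fret : Int) : List (Int × List Int) → List (Int × List Int)
  | [] => [(t, (List.replicate n (-1 : Int)).set s.toNat fret)]
  | e :: rest => if t == e.1 then (e.1, e.2.set s.toNat fret) :: rest else e :: aUpdate n s t fret rest

-- one item of A's loop body; s is the enumerate index (0 ≤ s < stringCount, so .toNat and List.set are exact here);
-- pyGet? = item[0], item[1] (none = IndexError, excluded by Pre_)
def aItem (n : Nat) (s : Int) (ev : List (Int × List Int)) (item : List Int) : List (Int × List Int) :=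
  match PySem.List.pyGet? item 0, PySem.List.pyGet? item 1 with
  | some t, some fret => aUpdate n s t fret ev
  | _, _ => ev

def markovEventsFromStringData (strings : List (List (List Int))) : List (Int × List Int) :=
  let stringCount := strings.length
  let eventArray := (PySem.List.enumerate strings).foldl
    (fun ev ss => ss.2.foldl (aItem stringCount ss.1) ev) []
  PySem.List.sorted eventArray (fun e => e.1)

-- ===== PORT B =====
-- one triple (t, s, fret) of B's flattening comprehension; pyGet? = item[0], item[1] (none = IndexError, excluded by Pre_)
def bTrip (s : Int) (item : List Int) : Option (Int × Int × Int) :=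
  match PySem.List.pyGet? item 0, PySem.List.pyGet? item 1 with
  | some t, some fret => some (t, s, fret)
  | _, _ => none

-- B's comprehension: [(int(item[0]), s, int(item[1])) for s, string in enumerate(strings) for item in string]
def bTriples (strings : List (List (List Int))) : List (Int × Int × Int) :=
  (PySem.List.enumerate strings).flatMap (fun ss => ss.2.filterMap (bTrip ss.1))

-- B's grouping pass (the two while loops): consume the run of triples sharing the head's time, emit one event
def bGroup (n : Nat) : List (Int × Int × Int) → List (Int × List Int)
  | [] => []
  | x :: rest =>
    let run := rest.takeWhile (fun y => y.1 == x.1)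
    let frets := run.foldl (fun fr y => fr.set y.2.1.toNat y.2.2)
      ((List.replicate n (-1 : Int)).set x.2.1.toNat x.2.2)
    (x.1, frets) :: bGroup n (rest.dropWhile (fun y => y.1 == x.1))
termination_by l => l.length
decreasing_by exact Nat.lt_succ_of_le (List.Sublist.length_le (List.dropWhile_sublist _))

def markovEventsFromStringData_alt (strings : List (List (List Int))) : List (Int × List Int) :=
  bGroup strings.length (PySem.List.sorted (bTriples strings) (fun x => x.1))

-- ===== PRECONDITION & SPEC =====
-- Pre_ excludes items of length < 2, on which A's item[0]/item[1] raises IndexError (B raises there too).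
def Pre_markovEventsFromStringData (strings : List (List (List Int))) : Prop :=
  ∀ string ∈ strings, ∀ item ∈ string, 2 ≤ item.length
instance (strings : List (List (List Int))) : Decidable (Pre_markovEventsFromStringData strings) := by
  unfold Pre_markovEventsFromStringData; infer_instance
def pvWitness_markovEventsFromStringData : List (List (List Int)) := [[[0, 3], [2, 5]], [[0, 1]]]

def Spec_markovEventsFromStringData (strings : List (List (List Int))) (out : List (Int × List Int)) : Prop := out = markovEventsFromStringData_alt strings
instance (strings : List (List (List Int))) (out : List (Int × List Int)) : Decidable (Spec_markovEventsFromStringData strings out) := by unfold Spec_markovEventsFromStringData; infer_instance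

-- ===== CLAIM (what is proved, stated in full; the proofs are below) =====
def Claim_equal_markovEventsFromStringData : Prop := ∀ (strings : List (List (List Int))), Dom_markovEventsFromStringData strings → Pre_markovEventsFromStringData strings → Spec_markovEventsFromStringData strings (markovEventsFromStringData strings)

-- ===== LEMMAS AND PROOFS =====

-- the value the t-event ends with: fold the fret updates of all triples with time t, in order
def valT (n : Nat) (t : Int) (L : List (Int × Int × Int)) : List Int :=
  (L.filter (fun y => y.1 == t)).foldl (fun fr y => fr.set y.2.1.toNat y.2.2) (List.replicate n (-1 : Int))

-- A's whole loop, rewritten as one fold over the flattened triples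
def genA (n : Nat) (L : List (Int × Int × Int)) : List (Int × List Int) :=
  L.foldl (fun e y => aUpdate n y.2.1 y.1 y.2.2 e) []

-- ---------- A's nested fold = fold over the triples ----------

lemma foldl_aItem_eq (n : Nat) (s : Int) (items : List (List Int)) (ev : List (Int × List Int))
    (h : ∀ item ∈ items, 2 ≤ item.length) :
    items.foldl (aItem n s) ev
      = (items.filterMap (bTrip s)).foldl (fun e y => aUpdate n y.2.1 y.1 y.2.2 e) ev := by
  induction items generalizing ev with
  | nil => rfl
  | cons item items ih =>
    match item, h item (List.mem_cons_self ..) with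
    | a :: b :: r, _ =>
      have h0 : PySem.List.pyGet? (a :: b :: r) 0 = some a := by
        have h := PySem.List.pyGet?_ofNat (a :: b :: r) 0 (by simp)
        norm_cast at h
      have h1 : PySem.List.pyGet? (a :: b :: r) 1 = some b := by
        have h := PySem.List.pyGet?_ofNat (a :: b :: r) 1 (by simp)
        norm_cast at h
      simp only [List.foldl_cons, List.filterMap_cons, aItem, bTrip, h0, h1]
      exact ih _ (fun it hit => h it (List.mem_cons_of_mem _ hit))

lemma eventArray_eq (strings : List (List (List Int)))
    (hpre : Pre_markovEventsFromStringData strings) :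
    (PySem.List.enumerate strings).foldl
        (fun ev ss => ss.2.foldl (aItem strings.length ss.1) ev) []
      = genA strings.length (bTriples strings) := by
  unfold genA bTriples
  rw [List.foldl_flatMap]
  apply PySem.List.foldl_congr_mem
  intro acc ss hss
  obtain ⟨k, hk, rfl⟩ := (PySem.List.mem_enumerate_iff strings 0 ss).mp hss
  exact foldl_aItem_eq _ _ _ _ (hpre _ (List.getElem_mem hk))

-- ---------- characterisation of A's fold ----------

lemma aUpdate_not_mem (n : Nat) (s : Int) (t fret : Int) (l : List (Int × List Int))
    (h : t ∉ l.map Prod.fst) :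
    aUpdate n s t fret l = l ++ [(t, (List.replicate n (-1 : Int)).set s.toNat fret)] := by
  induction l with
  | nil => rfl
  | cons e rest ih =>
    simp only [List.map_cons, List.mem_cons, not_or] at h
    simp [aUpdate, h.1, ih h.2]

lemma aUpdate_mem (n : Nat) (s : Int) (t fret : Int) (l : List (Int × List Int))
    (hnd : (l.map Prod.fst).Nodup) (h : t ∈ l.map Prod.fst) :
    aUpdate n s t fret l
      = l.map (fun p => if p.1 == t then (t, p.2.set s.toNat fret) else p) := by
  induction l with
  | nil => simp at h
  | cons e rest ih =>
    simp only [List.map_cons, List.nodup_cons] at hnd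
    by_cases he : t = e.1
    · have hrest : ∀ p ∈ rest, p.1 ≠ t := by
        intro p hp hpt
        exact hnd.1 (by rw [← he, ← hpt]; exact List.mem_map_of_mem hp)
      subst he
      have hmap : List.map (fun p => if p.1 = e.1 then (e.1, p.2.set s.toNat fret) else p) rest = rest := by
        conv_rhs => rw [← List.map_id rest]
        exact List.map_congr_left (fun p hp => by simp [hrest p hp])
      simp [aUpdate, hmap]
    · have h' : t ∈ rest.map Prod.fst := by
        rcases List.mem_cons.mp h with h0 | h0
        · exact absurd h0 he
        · exact h0
      simp only [aUpdate, List.map_cons, beq_iff_eq, if_neg he,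
        if_neg (Ne.symm he), ih hnd.2 h']

lemma valT_append_singleton (n : Nat) (t : Int) (L : List (Int × Int × Int)) (x : Int × Int × Int) :
    valT n t (L ++ [x])
      = if x.1 == t then (valT n t L).set x.2.1.toNat x.2.2 else valT n t L := by
  unfold valT
  rw [List.filter_append]
  by_cases h : x.1 == t
  · simp [h, List.foldl_append]
  · simp [h]

lemma dedup_append_singleton (l : List Int) (a : Int) :
    PySem.List.dedup (l ++ [a])
      = if a ∈ l then PySem.List.dedup l else PySem.List.dedup l ++ [a] := by
  have h1 : PySem.List.dedup (l ++ [a]) = PySem.Set.add (PySem.List.dedup l) a := by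
    show PySem.Set.ofList (l ++ [a]) = _
    unfold PySem.Set.ofList
    rw [List.foldl_append, List.foldl_cons, List.foldl_nil]
    rfl
  rw [h1]
  unfold PySem.Set.add
  by_cases h : a ∈ l
  · rw [if_pos h, if_pos]
    simpa using (PySem.List.mem_dedup l a).mpr h
  · rw [if_neg h, if_neg]
    simpa using fun hc => h ((PySem.List.mem_dedup l a).mp hc)

lemma genA_char (n : Nat) (L : List (Int × Int × Int)) :
    genA n L
      = (PySem.List.dedup (L.map (fun y => y.1))).map (fun t => (t, valT n t L)) := by
  induction L using List.reverseRecOn with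
  | nil => rfl
  | append_singleton L x ih =>
    unfold genA at ih ⊢
    rw [List.foldl_append, List.foldl_cons, List.foldl_nil, ih, List.map_append,
      List.map_singleton, dedup_append_singleton]
    by_cases hmem : x.1 ∈ L.map (fun y => y.1)
    · rw [if_pos hmem]
      rw [aUpdate_mem n x.2.1 x.1 x.2.2 _
        (by rw [List.map_map]
            have : (Prod.fst ∘ fun t => (t, valT n t L)) = id := rfl
            rw [this, List.map_id]; exact PySem.List.nodup_dedup _)
        (by rw [List.map_map]
            have : (Prod.fst ∘ fun t => (t, valT n t L)) = id := rfl
            rw [this, List.map_id]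
            exact (PySem.List.mem_dedup _ _).mpr hmem)]
      rw [List.map_map]
      apply List.map_congr_left
      intro t _
      simp only [Function.comp_apply]
      rw [valT_append_singleton]
      by_cases hx : t = x.1
      · subst hx; simp
      · simp [hx, Ne.symm hx]
    · rw [if_neg hmem,
        aUpdate_not_mem n x.2.1 x.1 x.2.2 _
          (by rw [List.map_map]
              have : (Prod.fst ∘ fun t => (t, valT n t L)) = id := rfl
              rw [this, List.map_id]
              simpa using fun hc => hmem ((PySem.List.mem_dedup _ _).mp hc)),
        List.map_append, List.map_singleton]
      congr 1
      · apply List.map_congr_left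
        intro t ht
        have ht' : t ∈ L.map (fun y => y.1) := (PySem.List.mem_dedup _ _).mp ht
        have : ¬ (x.1 == t) := by
          simp only [beq_iff_eq]
          intro he; exact hmem (he ▸ ht')
        rw [valT_append_singleton, if_neg this]
      · have hfil : L.filter (fun y => y.1 == x.1) = [] := by
          rw [List.filter_eq_nil_iff]
          intro y hy
          simp only [beq_iff_eq]
          intro he
          exact hmem (he ▸ List.mem_map_of_mem hy)
        rw [valT_append_singleton]
        simp [valT, hfil]

-- entries of genA: one per distinct time, with the folded fret value
lemma genA_mem (n : Nat) (L : List (Int × Int × Int)) (t : Int) (v : List Int) :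
    (t, v) ∈ genA n L ↔ t ∈ L.map (fun y => y.1) ∧ v = valT n t L := by
  rw [genA_char, List.mem_map]
  constructor
  · rintro ⟨t', ht', he⟩
    obtain ⟨rfl, rfl⟩ : t' = t ∧ valT n t' L = v := by
      exact ⟨congrArg Prod.fst he, congrArg Prod.snd he⟩
    exact ⟨(PySem.List.mem_dedup _ _).mp ht', rfl⟩
  · rintro ⟨hm, rfl⟩
    exact ⟨t, (PySem.List.mem_dedup _ _).mpr hm, rfl⟩

lemma genA_nodup (n : Nat) (L : List (Int × Int × Int)) : (genA n L).Nodup := by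
  rw [genA_char]
  exact (PySem.List.nodup_dedup _).map (fun a b he => congrArg Prod.fst he)

-- ---------- stability of the sort: the t-run of sorted(L) is the t-run of L ----------

lemma insertBy_nil (lt : (Int × Int × Int) → (Int × Int × Int) → Bool) (x : Int × Int × Int) :
    PySem.List.insertBy lt x [] = [x] := rfl

lemma insertBy_unfold (lt : (Int × Int × Int) → (Int × Int × Int) → Bool)
    (x y : Int × Int × Int) (ys : List (Int × Int × Int)) :
    PySem.List.insertBy lt x (y :: ys)
      = if lt x y then x :: y :: ys else y :: PySem.List.insertBy lt x ys := rfl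

lemma insertBy_pairwise (x : Int × Int × Int) (ys : List (Int × Int × Int))
    (h : ys.Pairwise (fun a b => a.1 ≤ b.1)) :
    (PySem.List.insertBy (fun a b => decide (a.1 < b.1)) x ys).Pairwise (fun a b => a.1 ≤ b.1) := by
  induction ys with
  | nil => simp [PySem.List.insertBy]
  | cons y ys ih =>
    rw [List.pairwise_cons] at h
    rw [insertBy_unfold]
    by_cases hb : x.1 < y.1
    · rw [if_pos (by simpa using hb), List.pairwise_cons]
      refine ⟨?_, List.pairwise_cons.mpr h⟩
      intro z hz
      rcases List.mem_cons.mp hz with rfl | hz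
      · exact le_of_lt hb
      · exact le_of_lt (lt_of_lt_of_le hb (h.1 z hz))
    · rw [if_neg (by simpa using hb), List.pairwise_cons]
      refine ⟨?_, ih h.2⟩
      intro z hz
      rcases (PySem.List.mem_insertBy _ x z ys).mp hz with rfl | hz
      · exact le_of_not_gt hb
      · exact h.1 z hz

lemma filter_insertBy (t : Int) (x : Int × Int × Int) (ys : List (Int × Int × Int))
    (h : ys.Pairwise (fun a b => a.1 ≤ b.1)) :
    (PySem.List.insertBy (fun a b => decide (a.1 < b.1)) x ys).filter (fun y => y.1 == t)
      = ys.filter (fun y => y.1 == t) ++ if x.1 == t then [x] else [] := by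
  induction ys with
  | nil =>
    rw [insertBy_nil]
    by_cases hx : x.1 == t <;> simp [hx]
  | cons y ys ih =>
    rw [List.pairwise_cons] at h
    rw [insertBy_unfold]
    by_cases hb : x.1 < y.1
    · rw [if_pos (by simpa using hb)]
      by_cases hx : x.1 == t
      · have hxt : x.1 = t := beq_iff_eq.mp hx
        have hnil : (y :: ys).filter (fun y => y.1 == t) = [] := by
          rw [List.filter_eq_nil_iff]
          intro z hz
          simp only [beq_iff_eq]
          intro he
          rcases List.mem_cons.mp hz with rfl | hz'
          · omega
          · have := h.1 z hz'
            omega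
        rw [List.filter_cons_of_pos (by simpa using hx), hnil]
        simp [hx]
      · rw [List.filter_cons_of_neg (by simpa using hx)]
        simp [hx]
    · rw [if_neg (by simpa using hb), List.filter_cons, List.filter_cons, ih h.2]
      by_cases hy : y.1 == t <;> simp [hy]

lemma foldl_insertBy_filter (t : Int) (l acc : List (Int × Int × Int))
    (h : acc.Pairwise (fun a b => a.1 ≤ b.1)) :
    (l.foldl (fun acc x => PySem.List.insertBy (fun a b => decide (a.1 < b.1)) x acc) acc).filter
        (fun y => y.1 == t)
      = acc.filter (fun y => y.1 == t) ++ l.filter (fun y => y.1 == t) := by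
  induction l generalizing acc with
  | nil => simp
  | cons x l ih =>
    rw [List.foldl_cons, ih _ (insertBy_pairwise x acc h), filter_insertBy t x acc h,
      List.filter_cons]
    by_cases hx : x.1 == t <;> simp [hx]

lemma sorted_filter (t : Int) (L : List (Int × Int × Int)) :
    (PySem.List.sorted L (fun x => x.1)).filter (fun y => y.1 == t)
      = L.filter (fun y => y.1 == t) := by
  rw [PySem.List.sorted_eq_foldl_insertBy L (fun x => x.1)]
  simpa using foldl_insertBy_filter t L [] (List.Pairwise.nil)

lemma valT_sorted (n : Nat) (t : Int) (L : List (Int × Int × Int)) :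
    valT n t (PySem.List.sorted L (fun x => x.1)) = valT n t L := by
  unfold valT
  rw [sorted_filter]

-- ---------- characterisation of B's grouping pass ----------

lemma dropWhile_keys_gt (a : Int) (rest : List (Int × Int × Int))
    (h : rest.Pairwise (fun p q => p.1 ≤ q.1)) (ha : ∀ y ∈ rest, a ≤ y.1) :
    ∀ y ∈ rest.dropWhile (fun y => y.1 == a), a < y.1 := by
  induction rest with
  | nil => simp
  | cons r rest ih =>
    rw [List.pairwise_cons] at h
    rw [List.dropWhile_cons]
    by_cases hp : (r.1 == a) = true
    · rw [if_pos hp]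
      exact ih h.2 (fun y hy => ha y (List.mem_cons_of_mem _ hy))
    · rw [if_neg hp]
      intro y hy
      have hra : a < r.1 := by
        have h1 := ha r (List.mem_cons_self ..)
        have h2 : r.1 ≠ a := by simpa using hp
        omega
      rcases List.mem_cons.mp hy with rfl | hy
      · exact hra
      · exact lt_of_lt_of_le hra (h.1 y hy)

lemma takeWhile_keys_eq (a : Int) (rest : List (Int × Int × Int)) :
    ∀ y ∈ rest.takeWhile (fun y => y.1 == a), y.1 = a := by
  intro y hy
  have := List.mem_takeWhile_imp hy
  simpa using this

-- the head run: filtering M = x :: rest by the head's time gives exactly x :: takeWhile-run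
lemma filter_head_run (x : Int × Int × Int) (rest : List (Int × Int × Int))
    (h : (x :: rest).Pairwise (fun p q => p.1 ≤ q.1)) :
    (x :: rest).filter (fun y => y.1 == x.1) = x :: rest.takeWhile (fun y => y.1 == x.1) := by
  rw [List.pairwise_cons] at h
  rw [List.filter_cons_of_pos (by simp)]
  congr 1
  conv_lhs => rw [← List.takeWhile_append_dropWhile (p := fun y => y.1 == x.1) (l := rest)]
  rw [List.filter_append,
    List.filter_eq_self.mpr (fun y hy => by simpa using takeWhile_keys_eq x.1 rest y hy),
    List.filter_eq_nil_iff.mpr (fun y hy => by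
      have := dropWhile_keys_gt x.1 rest h.2 h.1 y hy
      simp only [beq_iff_eq]; omega),
    List.append_nil]

-- filtering M = x :: rest by a time t > x.1 passes through head and run
lemma filter_other (x : Int × Int × Int) (rest : List (Int × Int × Int)) (t : Int)
    (h : (x :: rest).Pairwise (fun p q => p.1 ≤ q.1)) (hne : t ≠ x.1) :
    (x :: rest).filter (fun y => y.1 == t)
      = (rest.dropWhile (fun y => y.1 == x.1)).filter (fun y => y.1 == t) := by
  conv_lhs => rw [show x :: rest = [x] ++ rest.takeWhile (fun y => y.1 == x.1)
      ++ rest.dropWhile (fun y => y.1 == x.1) by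
    simp [List.takeWhile_append_dropWhile]]
  rw [List.filter_append, List.filter_append]
  rw [List.filter_eq_nil_iff.mpr (fun y hy => by
      rcases List.mem_singleton.mp hy with rfl
      simpa using Ne.symm hne),
    List.filter_eq_nil_iff.mpr (fun y hy => by
      have := takeWhile_keys_eq x.1 rest y hy
      simp only [beq_iff_eq]; rw [this]; exact Ne.symm hne)]
  simp

lemma bGroup_cons (n : Nat) (x : Int × Int × Int) (rest : List (Int × Int × Int)) :
    bGroup n (x :: rest)
      = (x.1, (rest.takeWhile (fun y => y.1 == x.1)).foldl (fun fr y => fr.set y.2.1.toNat y.2.2)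
            ((List.replicate n (-1 : Int)).set x.2.1.toNat x.2.2))
          :: bGroup n (rest.dropWhile (fun y => y.1 == x.1)) := by
  rw [bGroup]

lemma bGroup_mem (n : Nat) (M : List (Int × Int × Int))
    (h : M.Pairwise (fun p q => p.1 ≤ q.1)) (t : Int) (v : List Int) :
    (t, v) ∈ bGroup n M ↔ t ∈ M.map (fun y => y.1) ∧ v = valT n t M := by
  match M with
  | [] => simp [bGroup, valT]
  | x :: rest =>
    have hpc := List.pairwise_cons.mp h
    have hrest' : (rest.dropWhile (fun y => y.1 == x.1)).Pairwise (fun p q => p.1 ≤ q.1) :=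
      hpc.2.sublist (List.dropWhile_sublist _)
    have hgt := dropWhile_keys_gt x.1 rest hpc.2 hpc.1
    have ihm := bGroup_mem n (rest.dropWhile (fun y => y.1 == x.1)) hrest' t v
    have hval_head : valT n x.1 (x :: rest)
        = (rest.takeWhile (fun y => y.1 == x.1)).foldl (fun fr y => fr.set y.2.1.toNat y.2.2)
            ((List.replicate n (-1 : Int)).set x.2.1.toNat x.2.2) := by
      unfold valT
      rw [filter_head_run x rest h, List.foldl_cons]
    rw [bGroup_cons, List.mem_cons, ihm]
    constructor
    · rintro (he | ⟨hm, rfl⟩)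
      · obtain ⟨rfl, rfl⟩ : x.1 = t ∧ _ = v :=
          ⟨(congrArg Prod.fst he).symm, (congrArg Prod.snd he).symm⟩
        exact ⟨by simp, hval_head.symm⟩
      · have hmM : t ∈ (x :: rest).map (fun y => y.1) := by
          have : t ∈ (rest.dropWhile (fun y => y.1 == x.1)).map (fun y => y.1) := hm
          obtain ⟨y, hy, rfl⟩ := List.mem_map.mp this
          exact List.mem_map_of_mem (List.mem_cons_of_mem _ ((List.dropWhile_sublist _).subset hy))
        have hne : t ≠ x.1 := by
          obtain ⟨y, hy, rfl⟩ := List.mem_map.mp hm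
          exact ne_of_gt (hgt y hy)
        refine ⟨hmM, ?_⟩
        unfold valT
        rw [filter_other x rest t h hne]
    · rintro ⟨hm, rfl⟩
      by_cases hne : t = x.1
      · subst hne
        left
        rw [hval_head]
      · right
        have hmr : t ∈ (rest.dropWhile (fun y => y.1 == x.1)).map (fun y => y.1) := by
          rcases List.mem_map.mp hm with ⟨y, hy, rfl⟩
          rcases List.mem_cons.mp hy with rfl | hy
          · exact absurd rfl hne
          · -- y ∈ rest with y.1 ≠ x.1 must survive the dropWhile
            conv at hy => rw [← List.takeWhile_append_dropWhile (p := fun z => z.1 == x.1) (l := rest)]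
            rcases List.mem_append.mp hy with hy | hy
            · exact absurd (takeWhile_keys_eq x.1 rest y hy) hne
            · exact List.mem_map_of_mem hy
        refine ⟨hmr, ?_⟩
        unfold valT
        rw [filter_other x rest t h hne]
termination_by M.length
decreasing_by exact Nat.lt_succ_of_le (List.Sublist.length_le (List.dropWhile_sublist _))

lemma bGroup_keys_sub (n : Nat) (M : List (Int × Int × Int))
    (h : M.Pairwise (fun p q => p.1 ≤ q.1)) :
    ∀ e ∈ bGroup n M, e.1 ∈ M.map (fun y => y.1) := by
  intro e he
  have : (e.1, e.2) ∈ bGroup n M := he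
  exact ((bGroup_mem n M h e.1 e.2).mp this).1

lemma bGroup_pairwise (n : Nat) (M : List (Int × Int × Int))
    (h : M.Pairwise (fun p q => p.1 ≤ q.1)) :
    (bGroup n M).Pairwise (fun a b => a.1 < b.1) := by
  match M with
  | [] => simp [bGroup]
  | x :: rest =>
    have hpc := List.pairwise_cons.mp h
    have hrest' : (rest.dropWhile (fun y => y.1 == x.1)).Pairwise (fun p q => p.1 ≤ q.1) :=
      hpc.2.sublist (List.dropWhile_sublist _)
    have hgt := dropWhile_keys_gt x.1 rest hpc.2 hpc.1
    rw [bGroup_cons, List.pairwise_cons]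
    refine ⟨?_, bGroup_pairwise n _ hrest'⟩
    intro e he
    obtain ⟨y, hy, hey⟩ := List.mem_map.mp (bGroup_keys_sub n _ hrest' e he)
    rw [← hey] at *
    exact hgt y hy
termination_by M.length
decreasing_by exact Nat.lt_succ_of_le (List.Sublist.length_le (List.dropWhile_sublist _))

lemma bGroup_nodup (n : Nat) (M : List (Int × Int × Int))
    (h : M.Pairwise (fun p q => p.1 ≤ q.1)) : (bGroup n M).Nodup :=
  (bGroup_pairwise n M h).imp (fun hlt => by intro he; rw [he] at hlt; exact absurd hlt (lt_irrefl _))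

-- ===== VERDICT (by name: the statement is the Claim_ definition above) =====
theorem markovEventsFromStringData_spec : Claim_equal_markovEventsFromStringData := by
  intro strings _ hpre
  unfold Spec_markovEventsFromStringData
  have hA : markovEventsFromStringData strings
      = PySem.List.sorted (genA strings.length (bTriples strings)) (fun e => e.1) := by
    show PySem.List.sorted ((PySem.List.enumerate strings).foldl
        (fun ev ss => ss.2.foldl (aItem strings.length ss.1) ev) []) (fun e => e.1) = _
    rw [eventArray_eq strings hpre]
  rw [hA]
  unfold markovEventsFromStringData_alt
  set n := strings.length with hn
  set L := bTriples strings with hL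
  set M := PySem.List.sorted L (fun x => x.1) with hM
  have hMp : M.Pairwise (fun p q => p.1 ≤ q.1) := PySem.List.sorted_pairwise L (fun x => x.1)
  apply PySem.List.sorted_eq_of_perm_of_pairwise_lt
  · -- (bGroup n M).Perm (genA n L)
    apply List.perm_of_nodup_nodup_toFinset_eq (bGroup_nodup n M hMp) (genA_nodup n L)
    ext e
    obtain ⟨t, v⟩ := e
    simp only [List.mem_toFinset]
    rw [bGroup_mem n M hMp t v, genA_mem n L t v]
    have hkeys : t ∈ M.map (fun y => y.1) ↔ t ∈ L.map (fun y => y.1) :=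
      ((PySem.List.sorted_perm L (fun x => x.1) false).map (fun y => y.1)).mem_iff
    rw [hkeys, hM, valT_sorted]

  · exact bGroup_pairwise n M hMp
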